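-- pv_equiv track=rewrite | github.com/trioskosmos/rabuka_reloaded | root_files/live_game_tester.py | select_phase_action
-- ===== SOURCE A (Python) =====
-- def select_phase_action(phase, actions):
--     """Select appropriate action for current phase"""
--     if phase == 'RockPaperScissors':
--         # Choose rock
--         for i, action in enumerate(actions):
--             if 'rock_choice' in action.get('action_type', ''):
--                 return i, action.get('action_type', '')
--
--     elif phase == 'ChooseFirstAttacker':
--         # Choose first attacker
--         for i, action in enumerate(actions):
--             if 'choose_first_attacker' in action.get('action_type', ''):
--                 return i, action.get('action_type', '')
--
--     elif phase in ['MulliganP1Turn', 'MulliganP2Turn']: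
--         # Skip mulligan
--         for i, action in enumerate(actions):
--             if 'skip_mulligan' in action.get('action_type', ''):
--                 return i, action.get('action_type', '')
--
--     return None, None
-- ===== SOURCE B (Python) =====
-- _TARGETS = ('rock_choice', 'choose_first_attacker', 'skip_mulligan')
--
-- _PHASE_KEY = {
--     'RockPaperScissors': 'rock_choice',
--     'ChooseFirstAttacker': 'choose_first_attacker',
--     'MulliganP1Turn': 'skip_mulligan',
--     'MulliganP2Turn': 'skip_mulligan',
-- }
--
-- def select_phase_action(phase, actions):
--     """Select appropriate action for current phase"""
--     # One pass over actions building an index: for every target substring,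
--     # the first (i, action_type) whose action_type contains it; then a
--     # table dispatch on phase reads the answer off the index.
--     first = {}
--     for i, action in enumerate(actions):
--         at = action.get('action_type', '')
--         for sub in _TARGETS:
--             if sub not in first and sub in at:
--                 first[sub] = (i, at)
--     key = _PHASE_KEY.get(phase)
--     if key is None:
--         return None, None
--     return first.get(key, (None, None))
-- ===== Notes on version B (the rewrite author's own statement) =====
-- stated objective: alternative
-- what changed: Instead of A's per-phase early-return scans, B makes one pass over actions building a first-occurrence index for all three target substrings, then answers by a phase-to-substring table lookup into that index.
import Mathlib
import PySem

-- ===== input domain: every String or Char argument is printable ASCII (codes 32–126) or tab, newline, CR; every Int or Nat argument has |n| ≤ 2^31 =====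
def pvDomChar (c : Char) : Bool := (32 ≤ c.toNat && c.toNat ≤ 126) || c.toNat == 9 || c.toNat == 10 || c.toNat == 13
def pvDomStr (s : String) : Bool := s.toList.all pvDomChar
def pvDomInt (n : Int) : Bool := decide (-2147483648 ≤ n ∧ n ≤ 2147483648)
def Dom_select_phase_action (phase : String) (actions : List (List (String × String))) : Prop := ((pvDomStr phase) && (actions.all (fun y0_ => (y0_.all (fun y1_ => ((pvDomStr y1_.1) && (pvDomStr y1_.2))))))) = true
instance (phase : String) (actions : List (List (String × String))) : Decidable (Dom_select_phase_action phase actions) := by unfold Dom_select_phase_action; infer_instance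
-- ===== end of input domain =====

-- B replaces A's per-phase early-return scans by ONE pass over actions that builds a
-- first-occurrence index for all three target substrings, followed by a table dispatch on phase.


-- ===== PORT A =====
-- A's first loop: for i, action in enumerate(actions): if 'rock_choice' in action.get('action_type',''): return i, action.get('action_type','')
def pvLoopRock (i : Int) : List (List (String × String)) → Option Int × Option String
  | [] => (none, none)
  | a :: rest =>
    if PySem.Str.isIn "rock_choice" (PySem.Dict.getD (PySem.Dict.mk a) "action_type" "") then
      (some i, some (PySem.Dict.getD (PySem.Dict.mk a) "action_type" ""))
    else pvLoopRock (i + 1) rest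

-- A's second loop (substring 'choose_first_attacker')
def pvLoopAttacker (i : Int) : List (List (String × String)) → Option Int × Option String
  | [] => (none, none)
  | a :: rest =>
    if PySem.Str.isIn "choose_first_attacker" (PySem.Dict.getD (PySem.Dict.mk a) "action_type" "") then
      (some i, some (PySem.Dict.getD (PySem.Dict.mk a) "action_type" ""))
    else pvLoopAttacker (i + 1) rest

-- A's third loop (substring 'skip_mulligan')
def pvLoopMulligan (i : Int) : List (List (String × String)) → Option Int × Option String
  | [] => (none, none)
  | a :: rest =>
    if PySem.Str.isIn "skip_mulligan" (PySem.Dict.getD (PySem.Dict.mk a) "action_type" "") then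
      (some i, some (PySem.Dict.getD (PySem.Dict.mk a) "action_type" ""))
    else pvLoopMulligan (i + 1) rest

def select_phase_action (phase : String) (actions : List (List (String × String))) : Option Int × Option String :=
  if phase == "RockPaperScissors" then pvLoopRock 0 actions
  else if phase == "ChooseFirstAttacker" then pvLoopAttacker 0 actions
  -- phase in ['MulliganP1Turn', 'MulliganP2Turn']
  else if phase == "MulliganP1Turn" || phase == "MulliganP2Turn" then pvLoopMulligan 0 actions
  else (none, none)

-- ===== PORT B =====
-- B's _TARGETS tuple
def pvTargets : List String := ["rock_choice", "choose_first_attacker", "skip_mulligan"]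

-- B's _PHASE_KEY table
def pvPhaseKey : PySem.Dict String String :=
  PySem.Dict.ofList [("RockPaperScissors", "rock_choice"), ("ChooseFirstAttacker", "choose_first_attacker"),
                     ("MulliganP1Turn", "skip_mulligan"), ("MulliganP2Turn", "skip_mulligan")]

-- B's index-building pass: for i, action in enumerate(actions): …; for sub in _TARGETS: if sub not in first and sub in at: first[sub] = (i, at)
def pvBuild (first : PySem.Dict String (Int × String)) (i : Int) :
    List (List (String × String)) → PySem.Dict String (Int × String)
  | [] => first
  | a :: rest =>
    let at_ := PySem.Dict.getD (PySem.Dict.mk a) "action_type" ""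
    let first' := pvTargets.foldl (fun d sub =>
        if !(PySem.Dict.contains d sub) && PySem.Str.isIn sub at_ then PySem.Dict.insert d sub (i, at_) else d) first
    pvBuild first' (i + 1) rest

def select_phase_action_alt (phase : String) (actions : List (List (String × String))) : Option Int × Option String :=
  let first := pvBuild PySem.Dict.empty 0 actions
  match PySem.Dict.get? pvPhaseKey phase with
  | none => (none, none)
  | some key =>
    -- first.get(key, (None, None))
    match PySem.Dict.get? first key with
    | some (i, at_) => (some i, some at_)
    | none => (none, none)

-- ===== PRECONDITION & SPEC =====
def Spec_select_phase_action (phase : String) (actions : List (List (String × String))) (out : Option Int × Option String) : Prop := out = select_phase_action_alt phase actions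
instance (phase : String) (actions : List (List (String × String))) (out : Option Int × Option String) : Decidable (Spec_select_phase_action phase actions out) := by unfold Spec_select_phase_action; infer_instance

-- ===== CLAIM (what is proved, stated in full; the proofs are below) =====
def Claim_equal_select_phase_action : Prop := ∀ (phase : String) (actions : List (List (String × String))), Dom_select_phase_action phase actions → Spec_select_phase_action phase actions (select_phase_action phase actions)

-- ===== LEMMAS AND PROOFS =====

-- proof helper: the first (index, action_type) whose action_type contains sub, as an Option
def pvOptScan (sub : String) (i : Int) : List (List (String × String)) → Option (Int × String)
  | [] => none
  | a :: rest =>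
    let at_ := PySem.Dict.getD (PySem.Dict.mk a) "action_type" ""
    if PySem.Str.isIn sub at_ then some (i, at_) else pvOptScan sub (i + 1) rest

theorem pvLoopRock_eq (i : Int) (xs : List (List (String × String))) :
    pvLoopRock i xs = match pvOptScan "rock_choice" i xs with
      | some (j, at_) => (some j, some at_) | none => (none, none) := by
  induction xs generalizing i with
  | nil => rfl
  | cons a rest ih => simp only [pvLoopRock, pvOptScan, ih]; split <;> simp

theorem pvLoopAttacker_eq (i : Int) (xs : List (List (String × String))) :
    pvLoopAttacker i xs = match pvOptScan "choose_first_attacker" i xs with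
      | some (j, at_) => (some j, some at_) | none => (none, none) := by
  induction xs generalizing i with
  | nil => rfl
  | cons a rest ih => simp only [pvLoopAttacker, pvOptScan, ih]; split <;> simp

theorem pvLoopMulligan_eq (i : Int) (xs : List (List (String × String))) :
    pvLoopMulligan i xs = match pvOptScan "skip_mulligan" i xs with
      | some (j, at_) => (some j, some at_) | none => (none, none) := by
  induction xs generalizing i with
  | nil => rfl
  | cons a rest ih => simp only [pvLoopMulligan, pvOptScan, ih]; split <;> simp

-- one step of B's inner target loop, read at a DIFFERENT key: unchanged
theorem pvStep_get (at_ : String) (v : Int × String) (s k : String) (hne : s ≠ k)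
    (e : PySem.Dict String (Int × String)) :
    PySem.Dict.get? (if !(PySem.Dict.contains e s) && PySem.Str.isIn s at_ then PySem.Dict.insert e s v else e) k
      = PySem.Dict.get? e k := by
  by_cases h : (!(PySem.Dict.contains e s) && PySem.Str.isIn s at_) = true
  · rw [if_pos h]; exact PySem.Dict.get?_insert_of_ne e v (fun hk => hne hk.symm)
  · rw [if_neg h]

-- one step of B's inner target loop, read at ITS OWN key
theorem pvStep_get_self (at_ : String) (v : Int × String) (k : String)
    (e : PySem.Dict String (Int × String)) :
    PySem.Dict.get? (if !(PySem.Dict.contains e k) && PySem.Str.isIn k at_ then PySem.Dict.insert e k v else e) k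
      = (PySem.Dict.get? e k).or (if PySem.Str.isIn k at_ then some v else none) := by
  by_cases hb : (!(PySem.Dict.contains e k) && PySem.Str.isIn k at_) = true
  · obtain ⟨hc, hs⟩ := Bool.and_eq_true_iff.mp hb
    have hn : PySem.Dict.get? e k = none := by
      cases h : PySem.Dict.get? e k with
      | none => rfl
      | some w =>
        rw [Bool.not_eq_eq_eq_not, Bool.not_true, PySem.Dict.contains_eq_isSome_get?, h] at hc
        simp at hc
    rw [if_pos hb, PySem.Dict.get?_insert_self, hn, if_pos hs]
    rfl
  · rw [if_neg hb]
    cases h : PySem.Dict.get? e k with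
    | some w => simp
    | none =>
      have hc : PySem.Dict.contains e k = false := by
        rw [PySem.Dict.contains_eq_isSome_get?, h]; rfl
      have hs : PySem.Str.isIn k at_ = false := by
        cases hcase : PySem.Str.isIn k at_
        · rfl
        · exact absurd (by rw [hc, hcase]; rfl) hb
      rw [hs]
      rfl

-- the built index, read at a target substring, equals the first-match scan for that substring
theorem pvBuild_get_rock (xs : List (List (String × String))) (d : PySem.Dict String (Int × String)) (i : Int) :
    PySem.Dict.get? (pvBuild d i xs) "rock_choice" =
      (PySem.Dict.get? d "rock_choice").or (pvOptScan "rock_choice" i xs) := by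
  induction xs generalizing d i with
  | nil => simp [pvBuild, pvOptScan]
  | cons a rest ih =>
    simp only [pvBuild, pvTargets, List.foldl, pvOptScan, ih]
    generalize PySem.Dict.getD (PySem.Dict.mk a) "action_type" "" = at_
    rw [pvStep_get at_ (i, at_) "skip_mulligan" "rock_choice" (by decide),
        pvStep_get at_ (i, at_) "choose_first_attacker" "rock_choice" (by decide),
        pvStep_get_self at_ (i, at_) "rock_choice" d]

    cases hd : PySem.Dict.get? d "rock_choice" <;> split_ifs <;> simp [Option.or]

theorem pvBuild_get_attacker (xs : List (List (String × String))) (d : PySem.Dict String (Int × String)) (i : Int) :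
    PySem.Dict.get? (pvBuild d i xs) "choose_first_attacker" =
      (PySem.Dict.get? d "choose_first_attacker").or (pvOptScan "choose_first_attacker" i xs) := by
  induction xs generalizing d i with
  | nil => simp [pvBuild, pvOptScan]
  | cons a rest ih =>
    simp only [pvBuild, pvTargets, List.foldl, pvOptScan, ih]
    generalize PySem.Dict.getD (PySem.Dict.mk a) "action_type" "" = at_
    rw [pvStep_get at_ (i, at_) "skip_mulligan" "choose_first_attacker" (by decide),
        pvStep_get_self at_ (i, at_) "choose_first_attacker",
        pvStep_get at_ (i, at_) "rock_choice" "choose_first_attacker" (by decide)]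
    cases hd : PySem.Dict.get? d "choose_first_attacker" <;> split_ifs <;> simp [Option.or]

theorem pvBuild_get_mulligan (xs : List (List (String × String))) (d : PySem.Dict String (Int × String)) (i : Int) :
    PySem.Dict.get? (pvBuild d i xs) "skip_mulligan" =
      (PySem.Dict.get? d "skip_mulligan").or (pvOptScan "skip_mulligan" i xs) := by
  induction xs generalizing d i with
  | nil => simp [pvBuild, pvOptScan]
  | cons a rest ih =>
    simp only [pvBuild, pvTargets, List.foldl, pvOptScan, ih]
    generalize PySem.Dict.getD (PySem.Dict.mk a) "action_type" "" = at_
    rw [pvStep_get_self at_ (i, at_) "skip_mulligan",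
        pvStep_get at_ (i, at_) "choose_first_attacker" "skip_mulligan" (by decide),
        pvStep_get at_ (i, at_) "rock_choice" "skip_mulligan" (by decide)]
    cases hd : PySem.Dict.get? d "skip_mulligan" <;> split_ifs <;> simp [Option.or]

theorem pvPhaseKey_get? (phase : String) :
    PySem.Dict.get? pvPhaseKey phase =
      if phase == "RockPaperScissors" then some "rock_choice"
      else if phase == "ChooseFirstAttacker" then some "choose_first_attacker"
      else if phase == "MulliganP1Turn" || phase == "MulliganP2Turn" then some "skip_mulligan"
      else none := by
  by_cases h1 : phase = "RockPaperScissors"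
  · subst h1; rfl
  by_cases h2 : phase = "ChooseFirstAttacker"
  · subst h2; rfl
  by_cases h3 : phase = "MulliganP1Turn"
  · subst h3; rfl
  by_cases h4 : phase = "MulliganP2Turn"
  · subst h4; rfl
  have h : pvPhaseKey = PySem.Dict.mk
      [("RockPaperScissors", "rock_choice"), ("ChooseFirstAttacker", "choose_first_attacker"),
       ("MulliganP1Turn", "skip_mulligan"), ("MulliganP2Turn", "skip_mulligan")] := by rfl
  rw [h]
  simp only [PySem.Dict.get?_mk_cons, beq_iff_eq]
  rw [if_neg (fun h => h1 h.symm), if_neg (fun h => h2 h.symm),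
      if_neg (fun h => h3 h.symm), if_neg (fun h => h4 h.symm)]
  simp [PySem.Dict.get?, h1, h2, h3, h4]

-- ===== VERDICT (by name: the statement is the Claim_ definition above) =====
theorem select_phase_action_spec : Claim_equal_select_phase_action := by
  intro phase actions _
  unfold Spec_select_phase_action select_phase_action select_phase_action_alt
  rw [pvPhaseKey_get?]
  split_ifs <;>
    simp [pvLoopRock_eq, pvLoopAttacker_eq, pvLoopMulligan_eq,
          pvBuild_get_rock, pvBuild_get_attacker, pvBuild_get_mulligan, PySem.Dict.get?_empty]
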